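-- pv_equiv track=rewrite | github.com/sethirus/The-Thiele-Machine | scripts/demonstrate_structured_oracle.py | _lincomb
-- ===== SOURCE A (Python) =====
-- def _lincomb(bits: int, basis: list[int]) -> int:
--     """Return XOR of basis[i] for which the i-th bit of 'bits' is 1."""
--     v = 0
--     i = 0
--     while i < len(basis):
--         if (bits >> i) & 1:
--             v ^= basis[i]
--         i += 1
--     return v
-- ===== SOURCE B (Python) =====
-- def _lincomb(bits: int, basis: list[int]) -> int:
--     """Return XOR of basis[i] for which the i-th bit of 'bits' is 1."""
--     v = 0
--     mask = bits & ((1 << len(basis)) - 1)   # the in-range bits, as a non-negative int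
--     while mask:
--         rest = mask & (mask - 1)            # mask with its lowest set bit cleared
--         v ^= basis[(mask ^ rest).bit_length() - 1]
--         mask = rest
--     return v
-- ===== Notes on version B (the rewrite author's own statement) =====
-- stated objective: faster
-- what changed: B masks bits down to the basis length once and then walks only the SET bits of the mask (clear-lowest-set-bit + bit_length), instead of A's while-loop that shifts and tests every index i < len(basis).
import Mathlib
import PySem

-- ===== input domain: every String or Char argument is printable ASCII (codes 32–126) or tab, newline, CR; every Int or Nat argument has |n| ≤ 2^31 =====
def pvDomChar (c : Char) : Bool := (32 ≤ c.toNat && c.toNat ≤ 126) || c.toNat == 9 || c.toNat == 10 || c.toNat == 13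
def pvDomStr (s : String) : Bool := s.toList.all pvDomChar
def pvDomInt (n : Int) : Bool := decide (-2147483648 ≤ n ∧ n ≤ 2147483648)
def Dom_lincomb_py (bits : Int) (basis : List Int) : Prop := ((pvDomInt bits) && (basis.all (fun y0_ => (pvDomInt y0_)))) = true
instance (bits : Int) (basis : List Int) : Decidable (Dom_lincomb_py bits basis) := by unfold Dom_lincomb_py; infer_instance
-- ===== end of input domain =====

-- B walks only the set bits of the length-masked 'bits' (clear-lowest-set-bit) instead of A's scan of every index; same return value.

-- ===== PORT A =====
-- 'v = 0; i = 0; while i < len(basis): if (bits >> i) & 1: v ^= basis[i]; i += 1' — the counter loop as a fold over i = 0..len-1.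
-- basis[i] with 0 ≤ i < len(basis) is always in range, so getD i 0 is exact here.
def lincomb_py (bits : Int) (basis : List Int) : Int :=
  (List.range basis.length).foldl
    (fun (v : Int) (i : Nat) => if PySem.Int.band (bits >>> i) 1 ≠ 0 then PySem.Int.bxor v (basis.getD i 0) else v) 0

-- ===== PORT B =====
-- termination fact for the loop: clearing the lowest set bit strictly decreases a positive mask
theorem pvRestLt (mask : Int) (h : ¬ mask ≤ 0) :
    (PySem.Int.band mask (mask - 1)).toNat < mask.toNat := by
  rw [PySem.Int.band_of_nonneg (by omega) (by omega)]
  have h1 : mask.toNat &&& (mask - 1).toNat ≤ (mask - 1).toNat := Nat.and_le_right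
  omega

-- 'while mask: rest = mask & (mask - 1); v ^= basis[(mask ^ rest).bit_length() - 1]; mask = rest'
-- mask is always ≥ 0 here, so Python's 'while mask:' is the 'mask ≤ 0' exit; basis index is in range, getD exact.
def lincombLoop (basis : List Int) (mask : Int) (v : Int) : Int :=
  if h : mask ≤ 0 then v
  else
    let rest := PySem.Int.band mask (mask - 1)
    lincombLoop basis rest
      (PySem.Int.bxor v (basis.getD (PySem.Int.bitLength (PySem.Int.bxor mask rest) - 1) 0))
termination_by mask.toNat
decreasing_by exact pvRestLt mask h

def lincomb_py_alt (bits : Int) (basis : List Int) : Int :=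
  lincombLoop basis (PySem.Int.band bits ((1 <<< basis.length) - 1)) 0

-- ===== PRECONDITION & SPEC =====
def Spec_lincomb_py (bits : Int) (basis : List Int) (out : Int) : Prop := out = lincomb_py_alt bits basis
instance (bits : Int) (basis : List Int) (out : Int) : Decidable (Spec_lincomb_py bits basis out) := by unfold Spec_lincomb_py; infer_instance

-- ===== CLAIM (what is proved, stated in full; the proofs are below) =====
def Claim_equal_lincomb_py : Prop := ∀ (bits : Int) (basis : List Int), Dom_lincomb_py bits basis → Spec_lincomb_py bits basis (lincomb_py bits basis)

-- ===== LEMMAS AND PROOFS =====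

theorem pvXorAssoc (a b c : Int) :
    PySem.Int.bxor (PySem.Int.bxor a b) c = PySem.Int.bxor a (PySem.Int.bxor b c) := by
  unfold PySem.Int.bxor
  split_ifs <;> simp [Nat.xor_assoc] <;> omega

theorem pvZeroXor (a : Int) : PySem.Int.bxor 0 a = a := by
  rw [PySem.Int.bxor_comm]; exact PySem.Int.bxor_zero a

-- the common shape of both folds, abbreviated
def pvFold (g : Nat → Int) (p : Nat → Bool) (v : Int) (l : List Nat) : Int :=
  l.foldl (fun v i => if p i then PySem.Int.bxor v (g i) else v) v

theorem pvPull (g : Nat → Int) (p : Nat → Bool) :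
    ∀ (l : List Nat) (v : Int), pvFold g p v l = PySem.Int.bxor v (pvFold g p 0 l) := by
  intro l
  induction l with
  | nil => intro v; simp [pvFold, PySem.Int.bxor_zero]
  | cons a t ih =>
    intro v
    simp only [pvFold, List.foldl_cons] at *
    rw [ih, ih (if p a then PySem.Int.bxor 0 (g a) else 0)]
    cases h : p a <;> simp [pvZeroXor, pvXorAssoc]

theorem pvFlip (g : Nat → Int) :
    ∀ (l : List Nat), l.Nodup → ∀ (p q : Nat → Bool) (i : Nat), i ∈ l →
      p i = true → q i = false → (∀ j ∈ l, j ≠ i → p j = q j) →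
      pvFold g p 0 l = PySem.Int.bxor (pvFold g q 0 l) (g i) := by
  intro l
  induction l with
  | nil => intro _ p q i hi; cases hi
  | cons a t ih =>
    intro hnd p q i hi hp hq hagree
    have hndt : t.Nodup := (List.nodup_cons.mp hnd).2
    by_cases hai : a = i
    · subst hai
      have hat : a ∉ t := (List.nodup_cons.mp hnd).1
      have hcong : pvFold g p 0 t = pvFold g q 0 t := by
        unfold pvFold
        exact PySem.List.foldl_congr_mem t _ _ 0
          (fun acc x hx => by
            have : x ≠ a := fun he => hat (he ▸ hx)
            rw [hagree x (List.mem_cons_of_mem _ hx) this])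
      simp only [pvFold, List.foldl_cons, hp, hq, if_true]
      have h1 : pvFold g p (PySem.Int.bxor 0 (g a)) t
          = PySem.Int.bxor (PySem.Int.bxor 0 (g a)) (pvFold g p 0 t) := pvPull g p t _
      show pvFold g p (PySem.Int.bxor 0 (g a)) t = PySem.Int.bxor (pvFold g q 0 t) (g a)
      rw [h1, hcong, pvZeroXor, PySem.Int.bxor_comm]
    · have hit : i ∈ t := by
        rcases List.mem_cons.mp hi with h | h
        · exact absurd h.symm hai
        · exact h
      have hpa : p a = q a := hagree a List.mem_cons_self hai
      have ihx := ih hndt p q i hit hp hq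
        (fun j hj hji => hagree j (List.mem_cons_of_mem _ hj) hji)
      show pvFold g p (if p a then PySem.Int.bxor 0 (g a) else 0) t
        = PySem.Int.bxor (pvFold g q (if q a then PySem.Int.bxor 0 (g a) else 0) t) (g i)
      rw [pvPull g p t _, pvPull g q t _, ihx, hpa, pvXorAssoc]

theorem pvLowChar : ∀ m : Nat, 0 < m →
    ∃ i, m.testBit i = true ∧
      ∀ j, (m &&& (m - 1)).testBit j = (m.testBit j && !(decide (j = i))) := by
  intro m
  induction m using Nat.strong_induction_on with
  | _ m IH =>
    intro hm
    rcases Nat.mod_two_eq_zero_or_one m with hpar | hpar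
    · -- even
      have h2 : 0 < m / 2 := by omega
      obtain ⟨i, hbit, hchar⟩ := IH (m / 2) (by omega) h2
      refine ⟨i + 1, ?_, ?_⟩
      · rw [Nat.testBit_succ]; exact hbit
      · intro j
        cases j with
        | zero =>
          rw [Nat.testBit_land, Nat.testBit_zero]
          simp [Nat.testBit_zero, hpar]
        | succ j =>
          rw [Nat.testBit_land, Nat.testBit_succ, Nat.testBit_succ (m - 1) j]
          have hd : (m - 1) / 2 = m / 2 - 1 := by omega
          rw [hd, ← Nat.testBit_land, hchar j]
          simp
    · -- odd
      refine ⟨0, ?_, ?_⟩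
      · rw [Nat.testBit_zero]; simp [hpar]
      · intro j
        cases j with
        | zero =>
          rw [Nat.testBit_land, Nat.testBit_zero, Nat.testBit_zero]
          have : (m - 1) % 2 = 0 := by omega
          simp [this]
        | succ j =>
          rw [Nat.testBit_land, Nat.testBit_succ, Nat.testBit_succ (m - 1) j]
          have hd : (m - 1) / 2 = m / 2 := by omega
          rw [hd]
          simp

theorem pvLowSpec (m : Nat) (hm : 0 < m) :
    ∃ i, m.testBit i = true ∧ m ^^^ (m &&& (m - 1)) = 2 ^ i ∧
      ∀ j, (m &&& (m - 1)).testBit j = (m.testBit j && !(decide (j = i))) := by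
  obtain ⟨i, hbit, hchar⟩ := pvLowChar m hm
  refine ⟨i, hbit, ?_, hchar⟩
  apply Nat.eq_of_testBit_eq
  intro j
  rw [Nat.testBit_xor, hchar j, Nat.testBit_two_pow]
  by_cases hji : j = i
  · subst hji; simp [hbit]
  · have hij : i ≠ j := fun h => hji h.symm
    simp [hji, hij]

theorem pvBitLenPow (i : Nat) : PySem.Int.bitLength ((2 ^ i : Nat) : Int) = i + 1 := by
  set L := PySem.Int.bitLength ((2 ^ i : Nat) : Int) with hL
  have hlt : ((2 ^ i : Nat) : Int).natAbs < 2 ^ L := PySem.Int.lt_two_pow_bitLength _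
  have hne : ((2 ^ i : Nat) : Int) ≠ 0 := by positivity
  have hle : 2 ^ (L - 1) ≤ ((2 ^ i : Nat) : Int).natAbs := PySem.Int.two_pow_bitLength_le _ hne
  rw [Int.natAbs_natCast] at hlt hle
  have h1 : i < L := (Nat.pow_lt_pow_iff_right (by omega)).mp hlt
  have h2 : L - 1 ≤ i := (Nat.pow_le_pow_iff_right (by omega)).mp hle
  omega

-- bits of 2^n - 1 - m' for m' < 2^n: the complement of m' below n
theorem pvCompBit : ∀ (n m' : Nat), m' < 2 ^ n →
    ∀ j, (2 ^ n - 1 - m').testBit j = (decide (j < n) && !(m'.testBit j)) := by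
  intro n
  induction n with
  | zero => intro m' hm j; interval_cases m'; simp
  | succ n ih =>
    intro m' hm j
    have hq : m' / 2 < 2 ^ n := by omega
    cases j with
    | zero =>
      rw [Nat.testBit_zero, Nat.testBit_zero]
      have h2 : 0 < 2 ^ n := Nat.two_pow_pos n
      have : (2 ^ (n + 1) - 1 - m') % 2 = 1 - m' % 2 := by
        have : 2 ^ (n+1) = 2 * 2 ^ n := by ring
        omega
      rw [this]
      rcases Nat.mod_two_eq_zero_or_one m' with h | h <;> simp [h]
    | succ j =>
      rw [Nat.testBit_succ, Nat.testBit_succ]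
      have h2 : 0 < 2 ^ n := Nat.two_pow_pos n
      have hdiv : (2 ^ (n + 1) - 1 - m') / 2 = 2 ^ n - 1 - m' / 2 := by
        have h21 : 2 ^ (n+1) = 2 * 2 ^ n := by ring
        omega
      rw [hdiv, ih (m' / 2) hq j]
      simp

theorem pvShiftNat (M i : Nat) : ((M : Int) >>> i) = ((M >>> i : Nat) : Int) := rfl

theorem pvBitOfNat (M i : Nat) :
    (PySem.Int.band ((M : Int) >>> i) 1 ≠ 0) ↔ M.testBit i = true := by
  rw [pvShiftNat, show (1 : Int) = ((1 : Nat) : Int) from rfl, PySem.Int.band_natCast,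
    Nat.and_one_is_mod, Nat.shiftRight_eq_div_pow, Nat.testBit_eq_decide_div_mod_eq]
  generalize M / 2 ^ i = k
  simp only [ne_eq, Nat.cast_eq_zero, decide_eq_true_iff]
  omega

theorem pvNegSuccShift (m : Nat) (i : Nat) : (Int.negSucc m >>> i) = Int.negSucc (m >>> i) := rfl

theorem pvBandNegSuccOne (k : Nat) : PySem.Int.band (Int.negSucc k) 1 = ((1 - k % 2 : Nat) : Int) := by
  unfold PySem.Int.band
  rw [if_neg (not_le.mpr (Int.negSucc_lt_zero _)), if_pos (by norm_num : (0:Int) ≤ 1)]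
  have harg : (-Int.negSucc k - 1).toNat = k := by rw [Int.negSucc_eq]; omega
  have h1 : (1 : Int).toNat = 1 := rfl
  rw [harg, h1, Nat.land_comm, Nat.and_one_is_mod]

theorem pvBitNegSucc (m i : Nat) :
    (PySem.Int.band (Int.negSucc m >>> i) 1 ≠ 0) ↔ m.testBit i = false := by
  rw [pvNegSuccShift, pvBandNegSuccOne, Nat.shiftRight_eq_div_pow,
    Nat.testBit_eq_decide_div_mod_eq]
  generalize m / 2 ^ i = k
  simp only [ne_eq, Nat.cast_eq_zero, decide_eq_false_iff_not]
  omega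

-- the mask 'bits & ((1 << n) - 1)' is a natural number whose bit i is (i < n) && ((bits >> i) & 1 != 0)
theorem pvMask (bits : Int) (n : Nat) :
    ∃ M : Nat, PySem.Int.band bits ((1 <<< n) - 1) = (M : Int) ∧
      ∀ i, M.testBit i = (decide (i < n) && decide (PySem.Int.band (bits >>> i) 1 ≠ 0)) := by
  have hb : ((1 <<< n : Nat) : Int) - 1 = ((2 ^ n - 1 : Nat) : Int) := by
    rw [Nat.shiftLeft_eq, one_mul]
    have : 1 ≤ 2 ^ n := Nat.one_le_two_pow
    omega
  rw [hb]
  cases bits with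
  | ofNat m =>
    refine ⟨m &&& (2 ^ n - 1), ?_, ?_⟩
    · exact_mod_cast PySem.Int.band_natCast m (2 ^ n - 1)
    · intro i
      rw [Nat.testBit_land, Nat.testBit_two_pow_sub_one]
      have hiff := pvBitOfNat m i
      by_cases h : m.testBit i = true
      · simp [h, hiff.mpr h, Bool.and_comm]
      · have hf : m.testBit i = false := by revert h; cases m.testBit i <;> simp
        have hno : ¬ (PySem.Int.band ((m : Int) >>> i) 1 ≠ 0) := fun hc => by
          rw [hiff.mp hc] at hf; exact absurd hf (by simp)
        simp [hf, hno]
  | negSucc m =>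
    refine ⟨2 ^ n - 1 - (m &&& (2 ^ n - 1)), ?_, ?_⟩
    · unfold PySem.Int.band
      have hneg : ¬ (0 : Int) ≤ Int.negSucc m := not_le.mpr (Int.negSucc_lt_zero _)
      have hpos : (0 : Int) ≤ ((2 ^ n - 1 : Nat) : Int) := Int.natCast_nonneg _
      rw [if_neg hneg, if_pos hpos]
      have h1 : ((2 ^ n - 1 : Nat) : Int).toNat = 2 ^ n - 1 := by omega
      have h2 : (-Int.negSucc m - 1).toNat = m := by rw [Int.negSucc_eq]; omega
      rw [h1, h2, Nat.land_comm (2 ^ n - 1) m]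
    · intro i
      rw [Nat.and_two_pow_sub_one_eq_mod]
      have hlt : m % 2 ^ n < 2 ^ n := Nat.mod_lt _ (Nat.two_pow_pos n)
      rw [pvCompBit n (m % 2 ^ n) hlt i, Nat.testBit_mod_two_pow]
      have hiff := pvBitNegSucc m i
      rw [pvNegSuccShift] at hiff
      by_cases hin : i < n
      · simp only [hin, decide_true, Bool.true_and]
        by_cases h : m.testBit i = true
        · have hz0 : PySem.Int.band (Int.negSucc (m >>> i)) 1 = 0 := by
            by_contra hc; rw [hiff.mp hc] at h; exact absurd h (by simp)
          simp [h, hz0]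
        · have hf : m.testBit i = false := by revert h; cases m.testBit i <;> simp
          have hz1 := hiff.mpr hf
          simp [hf, hz1]
      · simp [hin]

-- the common specification: XOR of basis[i] over the set bits of M below len(basis)
def xorSpec (M : Nat) (basis : List Int) : Int :=
  pvFold (fun i => basis.getD i 0) (fun i => M.testBit i) 0 (List.range basis.length)

theorem pvFoldConst : ∀ (l : List Nat) (v : Int),
    l.foldl (fun (v : Int) (_ : Nat) => v) v = v := by
  intro l
  induction l with
  | nil => intro v; rfl
  | cons a t ih => intro v; simp [List.foldl_cons, ih]

theorem pvSpecZero (basis : List Int) : xorSpec 0 basis = 0 := by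
  unfold xorSpec pvFold
  rw [PySem.List.foldl_congr_mem _ _ (fun (v : Int) (_ : Nat) => v) 0
    (fun acc x _ => by simp [Nat.zero_testBit])]
  exact pvFoldConst _ 0

-- A's fold equals xorSpec for any M whose low bits agree with '(bits >> i) & 1'
theorem pvA (bits : Int) (basis : List Int) (M : Nat)
    (h : ∀ i, i < basis.length → (M.testBit i = decide (PySem.Int.band (bits >>> i) 1 ≠ 0))) :
    lincomb_py bits basis = xorSpec M basis := by
  unfold lincomb_py xorSpec pvFold
  apply PySem.List.foldl_congr_mem
  intro acc x hx
  have hxn : x < basis.length := List.mem_range.mp hx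
  beta_reduce
  rw [h x hxn]
  by_cases hc : PySem.Int.band (bits >>> x) 1 ≠ 0 <;> simp [hc]

theorem pvLoop (basis : List Int) : ∀ M : Nat, M < 2 ^ basis.length → ∀ v : Int,
    lincombLoop basis (M : Int) v = PySem.Int.bxor v (xorSpec M basis) := by
  intro M
  induction M using Nat.strong_induction_on with
  | _ M IH =>
    intro hM v
    by_cases hz : M = 0
    · subst hz
      rw [lincombLoop]
      simp [pvSpecZero, PySem.Int.bxor_zero]
    · have hpos : 0 < M := Nat.pos_of_ne_zero hz
      obtain ⟨i, hbit, hxor, hchar⟩ := pvLowSpec M hpos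
      have hin : i < basis.length := by
        by_contra hge
        have h1 : 2 ^ i ≤ M := Nat.ge_two_pow_of_testBit hbit
        have h2 : 2 ^ basis.length ≤ 2 ^ i := Nat.pow_le_pow_right (by omega) (by omega)
        omega
      have hnm : ¬ ((M : Int) ≤ 0) := by omega
      rw [lincombLoop, dif_neg hnm]
      have hsub : ((M : Int) - 1) = ((M - 1 : Nat) : Int) := by omega
      have hrest : PySem.Int.band (M : Int) ((M : Int) - 1) = ((M &&& (M - 1) : Nat) : Int) := by
        rw [hsub]; exact PySem.Int.band_natCast M (M - 1)
      have hlow : PySem.Int.bxor (M : Int) (((M &&& (M - 1) : Nat) : Int))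
          = ((2 ^ i : Nat) : Int) := by
        rw [PySem.Int.bxor_natCast, hxor]
      have hidx : PySem.Int.bitLength (PySem.Int.bxor (M : Int) (((M &&& (M - 1) : Nat) : Int))) - 1 = i := by
        rw [hlow, pvBitLenPow]
        omega
      simp only [hrest, hidx]
      have hlt : M &&& (M - 1) < M := by
        have h1 : M &&& (M - 1) ≤ M - 1 := Nat.and_le_right
        omega
      have hbnd : M &&& (M - 1) < 2 ^ basis.length := by
        have h1 : M &&& (M - 1) ≤ M := Nat.and_le_left
        omega
      rw [IH (M &&& (M - 1)) hlt hbnd]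
      have hflip : xorSpec M basis
          = PySem.Int.bxor (xorSpec (M &&& (M - 1)) basis) (basis.getD i 0) := by
        unfold xorSpec
        apply pvFlip _ _ List.nodup_range _ _ i (List.mem_range.mpr hin) hbit
        · rw [hchar i]; simp
        · intro j _ hji
          rw [hchar j]; simp [hji]
      rw [hflip, pvXorAssoc,
        PySem.Int.bxor_comm (xorSpec (M &&& (M - 1)) basis) (basis.getD i 0)]

-- B equals xorSpec of the mask
theorem pvB (bits : Int) (basis : List Int) (M : Nat)
    (hM : PySem.Int.band bits ((1 <<< basis.length) - 1) = (M : Int))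
    (hb : M < 2 ^ basis.length) :
    lincomb_py_alt bits basis = xorSpec M basis := by
  unfold lincomb_py_alt
  rw [hM, pvLoop basis M hb 0, pvZeroXor]

-- ===== VERDICT (by name: the statement is the Claim_ definition above) =====
theorem lincomb_py_spec : Claim_equal_lincomb_py := by
  intro bits basis _
  unfold Spec_lincomb_py
  obtain ⟨M, hM, hbit⟩ := pvMask bits basis.length
  have hb : M < 2 ^ basis.length := by
    apply Nat.lt_pow_two_of_testBit
    intro i hi
    rw [hbit i]
    simp [Nat.not_lt.mpr hi]
  rw [pvA bits basis M (fun i hi => by rw [hbit i]; simp [hi]),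
    pvB bits basis M hM hb]
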